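-- pv_equiv track=rewrite | github.com/MustafaHaddara/google-code-jam-2020 | r1a/square/square.py | suppress
-- ===== SOURCE A (Python) =====
-- def suppress(row, cols_to_kill):
--     if len(cols_to_kill) == 0:
--         return row
--     newrow = []
--     for y,item in enumerate(row):
--         if y in cols_to_kill:
--             continue
--         newrow.append(item)
--     return newrow
-- ===== SOURCE B (Python) =====
-- def suppress(row, cols_to_kill):
--     if len(cols_to_kill) == 0:
--         return row
--     ks = sorted({p for p in cols_to_kill if 0 <= p < len(row)})
--     out = []
--     start = 0
--     for p in ks:
--         out += row[start:p]
--         start = p + 1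
--     out += row[start:]
--     return out
-- ===== Notes on version B (the rewrite author's own statement) =====
-- stated objective: alternative
-- what changed: Instead of walking the row and testing every index for membership in the kill set, B sorts the in-range kill positions once and concatenates the surviving slices between consecutive killed columns.
import Mathlib
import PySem

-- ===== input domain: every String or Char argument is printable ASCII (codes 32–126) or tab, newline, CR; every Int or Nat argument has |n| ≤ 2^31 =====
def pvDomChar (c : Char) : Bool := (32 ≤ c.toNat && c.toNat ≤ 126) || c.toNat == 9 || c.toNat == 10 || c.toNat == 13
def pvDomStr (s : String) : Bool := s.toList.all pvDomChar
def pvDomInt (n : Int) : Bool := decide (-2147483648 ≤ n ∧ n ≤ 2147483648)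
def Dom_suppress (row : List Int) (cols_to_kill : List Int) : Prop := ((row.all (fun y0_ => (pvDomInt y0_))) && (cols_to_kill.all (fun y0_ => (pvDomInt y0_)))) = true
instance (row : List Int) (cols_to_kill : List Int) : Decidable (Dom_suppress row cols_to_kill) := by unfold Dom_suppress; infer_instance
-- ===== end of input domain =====

-- B concatenates the surviving slices between the sorted in-range kill positions
-- instead of testing every index of the row for membership in the kill set
-- (objective: alternative decomposition of the same task; same cost).

-- ===== PORT A =====
def suppress (row : List Int) (cols_to_kill : List Int) : List Int :=
  if cols_to_kill.length = 0 then row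
  else
    (PySem.List.enumerate row).foldl
      (fun newrow yi => if yi.1 ∈ cols_to_kill then newrow else newrow ++ [yi.2]) []

-- ===== PORT B =====
def suppress_alt (row : List Int) (cols_to_kill : List Int) : List Int :=
  if cols_to_kill.length = 0 then row
  else
    let ks := PySem.List.sorted
      (PySem.Set.ofList (cols_to_kill.filter (fun p => decide (0 ≤ p ∧ p < (row.length : Int)))))
      (fun x => x) false
    let st := ks.foldl
      (fun (st : Int × List Int) p => (p + 1, st.2 ++ PySem.List.slice row (some st.1) (some p)))
      ((0 : Int), ([] : List Int))
    st.2 ++ PySem.List.slice row (some st.1) none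

-- ===== PRECONDITION & SPEC =====
def Spec_suppress (row : List Int) (cols_to_kill : List Int) (out : List Int) : Prop := out = suppress_alt row cols_to_kill
instance (row : List Int) (cols_to_kill : List Int) (out : List Int) : Decidable (Spec_suppress row cols_to_kill out) := by unfold Spec_suppress; infer_instance

-- ===== CLAIM (what is proved, stated in full; the proofs are below) =====
def Claim_equal_suppress : Prop := ∀ (row : List Int) (cols_to_kill : List Int), Dom_suppress row cols_to_kill → Spec_suppress row cols_to_kill (suppress row cols_to_kill)

-- ===== LEMMAS AND PROOFS =====

/-- Proof-side spec: the row with every element whose (absolute) index lies in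
`cols` removed, indices counted from `i`. -/
def pvKeep (row : List Int) (cols : List Int) (i : Int) : List Int :=
  match row with
  | [] => []
  | x :: xs => if i ∈ cols then pvKeep xs cols (i+1) else x :: pvKeep xs cols (i+1)

lemma pvKeep_foldl (cols : List Int) :
    ∀ (xs : List Int) (i : Int) (acc : List Int),
      (PySem.List.enumerate xs i).foldl
        (fun newrow yi => if yi.1 ∈ cols then newrow else newrow ++ [yi.2]) acc
      = acc ++ pvKeep xs cols i := by
  intro xs
  induction xs with
  | nil => intro i acc; simp [PySem.List.enumerate_nil, pvKeep]
  | cons x xs ih =>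
    intro i acc
    simp only [PySem.List.enumerate_cons, List.foldl_cons, pvKeep]
    by_cases h : i ∈ cols
    · simp [h, ih]
    · simp [h, ih]

lemma pvKeep_all (cols : List Int) :
    ∀ (xs : List Int) (i : Int),
      (∀ j : Int, i ≤ j → j < i + xs.length → j ∉ cols) → pvKeep xs cols i = xs := by
  intro xs
  induction xs with
  | nil => intro i _; rfl
  | cons x xs ih =>
    intro i h
    have hx : i ∉ cols := h i le_rfl (by simp)
    simp only [pvKeep, if_neg hx]
    rw [ih (i+1)]
    intro j h1 h2
    exact h j (by omega) (by simp at h2 ⊢; omega)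

lemma pvKeep_append (cols : List Int) :
    ∀ (xs ys : List Int) (i : Int),
      pvKeep (xs ++ ys) cols i = pvKeep xs cols i ++ pvKeep ys cols (i + xs.length) := by
  intro xs
  induction xs with
  | nil => intro ys i; simp [pvKeep]
  | cons x xs ih =>
    intro ys i
    simp only [List.cons_append, pvKeep, ih, List.length_cons]
    have harith : i + 1 + (xs.length : Int) = i + ((xs.length : Int) + 1) := by ring
    rw [harith]
    by_cases h : i ∈ cols
    · simp [h]
    · simp [h]

lemma pvSegGo (row cols : List Int) :
    ∀ (ks : List Int) (s : Int) (acc : List Int), 0 ≤ s →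
      ks.Pairwise (· < ·) →
      (∀ q : Int, q ∈ ks ↔ (q ∈ cols ∧ s ≤ q ∧ q < (row.length : Int))) →
      (let st := ks.foldl
          (fun (st : Int × List Int) p => (p + 1, st.2 ++ PySem.List.slice row (some st.1) (some p)))
          (s, acc);
        st.2 ++ PySem.List.slice row (some st.1) none)
      = acc ++ pvKeep (row.drop s.toNat) cols s := by
  intro ks
  induction ks with
  | nil =>
    intro s acc hs _ hmem
    simp only [List.foldl_nil]
    rw [PySem.List.slice_from row hs, pvKeep_all]
    intro j h1 h2 hj
    have := (hmem j).mpr ⟨hj, h1, by simp [List.length_drop] at h2 ⊢; omega⟩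
    simp at this
  | cons p ks ih =>
    intro s acc hs hpw hmem
    have hp := (hmem p).mp (List.mem_cons_self)
    obtain ⟨hpc, hsp, hpn⟩ := hp
    have hgt : ∀ q ∈ ks, p < q := by
      intro q hq; exact (List.pairwise_cons.mp hpw).1 q hq
    have hpw' := (List.pairwise_cons.mp hpw).2
    simp only [List.foldl_cons]
    rw [ih (p+1) (acc ++ PySem.List.slice row (some s) (some p)) (by omega) hpw' ?_]
    · -- rearrange: acc ++ slice ++ keep(p+1)  =  acc ++ keep(s)
      rw [List.append_assoc]
      congr 1
      -- keep (drop s) s = slice s p ++ keep (drop (p+1)) (p+1)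
      have h0p : (0:Int) ≤ p := by omega
      rw [PySem.List.slice_toNat row hs h0p]
      have hsn : s.toNat ≤ p.toNat := by omega
      have hpn' : p.toNat < row.length := by omega
      have hsplit : row.drop s.toNat
          = (row.drop s.toNat).take (p.toNat - s.toNat) ++ (row.drop s.toNat).drop (p.toNat - s.toNat) := by
        simp
      conv_rhs => rw [hsplit]
      rw [pvKeep_append]
      have hlen : ((row.drop s.toNat).take (p.toNat - s.toNat)).length = p.toNat - s.toNat := by
        simp [List.length_take, List.length_drop]; omega
      congr 1
      · -- the untouched segment
        rw [pvKeep_all]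
        intro j h1 h2 hj
        rw [hlen] at h2
        have hjlt : j < p := by omega
        have := (hmem j).mpr ⟨hj, h1, by omega⟩
        rcases List.mem_cons.mp this with h | h
        · omega
        · have := hgt j h; omega
      · -- the tail: drop past p, consume row[p]
        rw [hlen, List.drop_drop]
        have hdp : s.toNat + (p.toNat - s.toNat) = p.toNat := by omega
        have harith : s + ((p.toNat - s.toNat : Nat) : Int) = p := by omega
        rw [hdp, harith]
        rw [List.drop_eq_getElem_cons hpn']
        simp only [pvKeep, if_pos hpc]
        have : (p+1).toNat = p.toNat + 1 := by omega
        rw [this]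
    · -- membership characterisation for the tail ks
      intro q
      constructor
      · intro hq
        have h1 := (hmem q).mp (List.mem_cons_of_mem _ hq)
        have := hgt q hq
        exact ⟨h1.1, by omega, h1.2.2⟩
      · rintro ⟨hqc, hq1, hq2⟩
        have : q ∈ p :: ks := (hmem q).mpr ⟨hqc, by omega, hq2⟩
        rcases List.mem_cons.mp this with h | h
        · omega
        · exact h

-- ===== VERDICT (by name: the statement is the Claim_ definition above) =====
theorem suppress_spec : Claim_equal_suppress := by
  intro row cols _
  unfold Spec_suppress suppress suppress_alt
  by_cases h : cols.length = 0
  · simp [h]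
  · simp only [if_neg h]
    rw [pvKeep_foldl]
    rw [pvSegGo row cols _ 0 [] le_rfl
      (PySem.List.sorted_ofList_pairwise_lt _)
      (by
        intro q
        rw [PySem.List.mem_sorted, PySem.Set.mem_ofList, List.mem_filter]
        simp)]
    simp
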